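-- pv_equiv track=rewrite | github.com/Dhruv-dx/ISF-Pricing-Workflow | inshape_pricing_formatter.py | get_program_availability
-- ===== SOURCE A (Python) =====
-- from typing import Dict, List, Set
--
-- def get_program_availability(rows: List[List[str]], available_programs: Dict[str, int]) -> Dict[str, str]:
--     """Extract program availability information from all rows for a club.
--     Only checks programs that exist in the CSV."""
--     availability = {}
--
--     # Only check programs that exist in the CSV
--     for program, col_idx in available_programs.items():
--         availability[program] = "not available"
--
--         for row in rows:
--             if col_idx < len(row):
--                 value = row[col_idx].strip()
--                 # Look for actual price values (containing $ and digits) or any non-empty value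
--                 if value and (("$" in value and any(c.isdigit() for c in value)) or (value != "" and value != "-")):
--                     availability[program] = "available"
--                     break
--
--     return availability
-- ===== SOURCE B (Python) =====
-- from typing import Dict, List
--
-- def get_program_availability(rows: List[List[str]], available_programs: Dict[str, int]) -> Dict[str, str]:
--     """Single transposed sweep: rows are the outer loop; a shrinking list of
--     still-undecided programs is the inner one, stopping once all are decided."""
--     availability = {program: "not available" for program in available_programs}
--     remaining = list(available_programs.items())
--     for row in rows:
--         if not remaining:
--             break
--         still = []
--         for program, col_idx in remaining:
--             hit = False
--             if col_idx < len(row):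
--                 value = row[col_idx].strip()
--                 if value and value != "-":
--                     hit = True
--             if hit:
--                 availability[program] = "available"
--             else:
--                 still.append((program, col_idx))
--         remaining = still
--     return availability
-- ===== Notes on version B (the rewrite author's own statement) =====
-- stated objective: alternative
-- what changed: A scans all rows separately for each program; B makes one transposed sweep over the rows, maintaining a shrinking list of still-undecided programs and stopping early once every program is decided, and drops A's redundant '$'-branch of the cell test.
-- outside the precondition, e.g. on get_program_availability([['x'], []], {'p': -1}): A returns {'p': 'available'}, B returns {'p': 'available'}
import Mathlib
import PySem

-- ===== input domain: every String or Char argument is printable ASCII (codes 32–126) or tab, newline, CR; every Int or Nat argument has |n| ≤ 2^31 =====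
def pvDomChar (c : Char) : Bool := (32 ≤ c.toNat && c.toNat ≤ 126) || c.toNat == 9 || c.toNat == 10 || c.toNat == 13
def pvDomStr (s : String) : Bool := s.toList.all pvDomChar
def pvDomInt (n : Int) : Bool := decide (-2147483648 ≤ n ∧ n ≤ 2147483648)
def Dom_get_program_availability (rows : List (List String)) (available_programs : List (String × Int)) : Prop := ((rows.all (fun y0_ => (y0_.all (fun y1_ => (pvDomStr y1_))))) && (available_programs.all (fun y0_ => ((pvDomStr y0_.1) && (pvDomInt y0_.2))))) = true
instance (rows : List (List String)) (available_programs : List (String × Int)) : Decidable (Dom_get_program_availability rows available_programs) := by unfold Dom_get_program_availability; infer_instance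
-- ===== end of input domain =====

-- B does ONE transposed sweep (rows outer, a shrinking list of undecided programs inner,
-- stopping early once none remain) instead of A's per-program rescan of the rows.

-- ===== PORT A =====
-- A's per-row value test, factored out verbatim
def pvValueOkA (value : String) : Bool :=
  value != "" &&
    ((PySem.Str.isIn "$" value && value.toList.any PySem.Chars.isdigit) ||
      (value != "" && value != "-"))

-- A's inner 'for row in rows: … break' loop for one program
def pvScanA (rows : List (List String)) (col_idx : Int) : Bool :=
  match rows with
  | [] => false
  | row :: rest =>
    if col_idx < (row.length : Int) then
      if pvValueOkA (PySem.Str.strip ((PySem.List.pyGet? row col_idx).getD "")) then true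
      else pvScanA rest col_idx
    else pvScanA rest col_idx

def get_program_availability (rows : List (List String)) (available_programs : List (String × Int)) : List (String × String) :=
  ((PySem.Dict.ofList available_programs).items.foldl
    (fun d pc =>
      let d1 := d.insert pc.1 "not available"
      if pvScanA rows pc.2 then d1.insert pc.1 "available" else d1)
    PySem.Dict.empty).items

-- ===== PORT B =====
-- B's per-cell test ('hit' in Source B)
def pvCellHit (row : List String) (col_idx : Int) : Bool :=
  if col_idx < (row.length : Int) then
    let value := PySem.Str.strip ((PySem.List.pyGet? row col_idx).getD "")
    value != "" && value != "-"
  else false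

-- B's outer 'for row in rows' loop carrying (availability, still-remaining programs)
def pvSweep (rows : List (List String)) (avail : PySem.Dict String String)
    (rem : List (String × Int)) : PySem.Dict String String :=
  match rows with
  | [] => avail
  | row :: rest =>
    if rem.isEmpty then avail
    else
      let st := rem.foldl
        (fun (st : PySem.Dict String String × List (String × Int)) pc =>
          if pvCellHit row pc.2 then (st.1.insert pc.1 "available", st.2)
          else (st.1, st.2 ++ [pc]))
        (avail, [])
      pvSweep rest st.1 st.2

def get_program_availability_alt (rows : List (List String)) (available_programs : List (String × Int)) : List (String × String) :=
  let programs := PySem.Dict.ofList available_programs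
  let availability := programs.keys.foldl (fun d p => d.insert p "not available") PySem.Dict.empty
  (pvSweep rows availability programs.items).items

-- ===== PRECONDITION & SPEC =====
-- Pre_ excludes inputs where some program's column index is negative and out of range for some
-- row: there Python raises IndexError (negative indices wrap) as soon as such a row is reached.
-- This is a slight over-approximation: it also excludes inputs on which A still returns because
-- every program breaks out of its row loop before reaching the too-short row (see cites).
def Pre_get_program_availability (rows : List (List String)) (available_programs : List (String × Int)) : Prop :=
  ∀ pc ∈ available_programs, pc.2 < 0 → ∀ row ∈ rows, -((row.length : Int)) ≤ pc.2
instance (rows : List (List String)) (available_programs : List (String × Int)) : Decidable (Pre_get_program_availability rows available_programs) := by unfold Pre_get_program_availability; infer_instance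

def pvWitness_get_program_availability : List (List String) × (List (String × Int)) :=
  ([["x", "-"], ["", " $5 "]], [("p", 1), ("q", 0), ("r", 5)])

def Spec_get_program_availability (rows : List (List String)) (available_programs : List (String × Int)) (out : List (String × String)) : Prop := out = get_program_availability_alt rows available_programs
instance (rows : List (List String)) (available_programs : List (String × Int)) (out : List (String × String)) : Decidable (Spec_get_program_availability rows available_programs out) := by unfold Spec_get_program_availability; infer_instance

-- ===== CLAIM (what is proved, stated in full; the proofs are below) =====
def Claim_equal_get_program_availability : Prop := ∀ (rows : List (List String)) (available_programs : List (String × Int)), Dom_get_program_availability rows available_programs → Pre_get_program_availability rows available_programs → Spec_get_program_availability rows available_programs (get_program_availability rows available_programs)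

-- ===== LEMMAS AND PROOFS =====

-- 'some row has a hit' form of the scan, the common reference point of both ports
def pvScanB (rows : List (List String)) (col_idx : Int) : Bool :=
  rows.any (fun row => pvCellHit row col_idx)

-- A's value predicate simplifies: its '$'-branch is subsumed by the non-empty/non-dash branch
lemma pvValueOkA_eq (v : String) : pvValueOkA v = (v != "" && v != "-") := by
  unfold pvValueOkA
  by_cases h1 : v = ""
  · simp [h1]
  · by_cases h2 : v = "-"
    · subst h2; decide
    · have a1 : (v != "") = true := by simpa using h1
      have a2 : (v != "-") = true := by simpa using h2
      simp [a1, a2]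

lemma pvScanA_eq (rows : List (List String)) (c : Int) : pvScanA rows c = pvScanB rows c := by
  induction rows with
  | nil => rfl
  | cons row rest ih =>
    simp only [pvScanA, pvScanB, List.any_cons, pvCellHit]
    split
    · rw [pvValueOkA_eq]
      cases h : (PySem.Str.strip ((PySem.List.pyGet? row c).getD "") != "" &&
          PySem.Str.strip ((PySem.List.pyGet? row c).getD "") != "-") <;>
        simp [ih, pvScanB, pvCellHit]
    · simp [ih, pvScanB, pvCellHit]

-- A's dict build characterized as a map over the program dict's items
lemma portA_items (rows : List (List String)) (aps : List (String × Int)) :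
    get_program_availability rows aps =
      (PySem.Dict.ofList aps).items.map
        (fun pc => (pc.1, if pvScanB rows pc.2 then "available" else "not available")) := by
  unfold get_program_availability
  rw [PySem.List.foldl_congr_mem ((PySem.Dict.ofList aps).items) _
    (fun (d : PySem.Dict String String) (pc : String × Int) =>
      d.insert pc.1 (if pvScanA rows pc.2 then "available" else "not available"))
    PySem.Dict.empty
    (by intro acc pc _; by_cases h : pvScanA rows pc.2 <;>
        simp [h, PySem.Dict.insert_insert_self])]
  rw [PySem.Dict.items_foldl_insert_fresh ((PySem.Dict.ofList aps).items) Prod.fst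
      (fun pc => if pvScanA rows pc.2 then "available" else "not available")
      PySem.Dict.empty
      (by intro a _; simp) (by simpa [PySem.Dict.keys] using PySem.Dict.nodup_keys_ofList (ps := aps))]
  simp [pvScanA_eq, PySem.Dict.empty]

-- a conditional-insert loop over a snapshot list, as a map over the dict's items
lemma foldl_hit_insert_items (L : List (String × Int)) (P : String × Int → Bool)
    (a : PySem.Dict String String) (h : ∀ pc ∈ L, a.contains pc.1 = true) :
    (L.foldl (fun a pc => if P pc then a.insert pc.1 "available" else a) a).items
      = a.items.map (fun pv => if L.any (fun pc => pc.1 == pv.1 && P pc) then (pv.1, "available") else pv) := by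
  induction L generalizing a with
  | nil => simp
  | cons pc L' ih =>
    have hpc : a.contains pc.1 = true := h pc (by simp)
    have h' : ∀ qc ∈ L', ((if P pc then a.insert pc.1 "available" else a).contains qc.1) = true := by
      intro qc hq
      by_cases hP : P pc <;> simp [hP, PySem.Dict.contains_insert, h qc (by simp [hq])]
    rw [List.foldl_cons, ih _ h']
    by_cases hP : P pc
    · rw [if_pos hP, PySem.Dict.items_insert, if_pos hpc, List.map_map]
      apply List.map_congr_left
      intro pv _
      by_cases hk : pv.1 = pc.1
      · simp [Function.comp, hk, hP]
      · have e1 : (pv.1 == pc.1) = false := by simpa using hk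
        have e2 : (pc.1 == pv.1) = false := by simpa using (Ne.symm hk)
        simp only [Function.comp, List.any_cons, e1, e2, Bool.false_and, Bool.false_or,
          if_false, Bool.false_eq_true]
    · rw [if_neg hP]
      rw [Bool.not_eq_true] at hP
      apply List.map_congr_left
      intro pv _
      rw [List.any_cons, hP]
      simp only [Bool.and_false, Bool.false_or]

-- the inner pair fold of pvSweep splits into its two independent accumulators
lemma pvRow_split (row : List String) (rem : List (String × Int))
    (avail : PySem.Dict String String) :
    rem.foldl
        (fun (st : PySem.Dict String String × List (String × Int)) pc =>
          if pvCellHit row pc.2 then (st.1.insert pc.1 "available", st.2)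
          else (st.1, st.2 ++ [pc]))
        (avail, [])
      = (rem.foldl (fun a pc => if pvCellHit row pc.2 then a.insert pc.1 "available" else a) avail,
         rem.filter (fun pc => !pvCellHit row pc.2)) := by
  rw [PySem.List.foldl_congr_mem rem _
    (fun (st : PySem.Dict String String × List (String × Int)) pc =>
      ((fun (a : PySem.Dict String String) (pc : String × Int) =>
          if pvCellHit row pc.2 then a.insert pc.1 "available" else a) st.1 pc,
       (fun (acc : List (String × Int)) (pc : String × Int) =>
          if !pvCellHit row pc.2 then acc ++ [pc] else acc) st.2 pc))
    (avail, [])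
    (by intro st pc _; by_cases h : pvCellHit row pc.2 <;> simp [h])]
  rw [PySem.List.foldl_prod_mk (fun (a : PySem.Dict String String) (pc : String × Int) => if pvCellHit row pc.2 then a.insert pc.1 "available" else a) (fun (acc : List (String × Int)) (pc : String × Int) => if !pvCellHit row pc.2 then acc ++ [pc] else acc) rem avail []]
  rw [PySem.List.foldl_append_if_eq_filter]
  simp

-- B's sweep characterized as a map over the starting availability items
lemma pvSweep_items (rows : List (List String)) (avail : PySem.Dict String String)
    (rem : List (String × Int)) (h : ∀ pc ∈ rem, avail.contains pc.1 = true) :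
    (pvSweep rows avail rem).items
      = avail.items.map (fun pv => if rem.any (fun pc => pc.1 == pv.1 && pvScanB rows pc.2) then (pv.1, "available") else pv) := by
  induction rows generalizing avail rem with
  | nil => simp [pvSweep, pvScanB]
  | cons row rest ih =>
    by_cases hE : rem.isEmpty
    · rw [List.isEmpty_iff] at hE
      subst hE
      simp [pvSweep]
    · rw [show pvSweep (row :: rest) avail rem =
        (if rem.isEmpty then avail
         else
           let st := rem.foldl
            (fun (st : PySem.Dict String String × List (String × Int)) pc =>
              if pvCellHit row pc.2 then (st.1.insert pc.1 "available", st.2)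
              else (st.1, st.2 ++ [pc]))
            (avail, [])
           pvSweep rest st.1 st.2) from rfl, if_neg hE]
      rw [pvRow_split]
      have hc' : ∀ pc ∈ rem.filter (fun pc => !pvCellHit row pc.2),
          ((rem.foldl (fun a pc => if pvCellHit row pc.2 then a.insert pc.1 "available" else a) avail).contains pc.1) = true := by
        intro pc hpc
        have hmem : pc ∈ rem := List.mem_of_mem_filter hpc
        have hkeys : (rem.foldl (fun a pc => if pvCellHit row pc.2 then a.insert pc.1 "available" else a) avail).keys = avail.keys := by
          show ((rem.foldl (fun a pc => if pvCellHit row pc.2 then a.insert pc.1 "available" else a) avail).items).map Prod.fst = (avail.items).map Prod.fst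
          rw [foldl_hit_insert_items _ _ _ h, List.map_map]
          apply List.map_congr_left
          intro pv _
          by_cases hx : rem.any (fun pc => pc.1 == pv.1 && pvCellHit row pc.2) <;> simp [hx]
        rw [PySem.Dict.contains_iff_mem_keys, hkeys, ← PySem.Dict.contains_iff_mem_keys]
        exact h pc hmem
      rw [ih _ _ hc', foldl_hit_insert_items _ _ _ h, List.map_map]
      apply List.map_congr_left
      intro pv _
      by_cases h1 : rem.any (fun pc => pc.1 == pv.1 && pvCellHit row pc.2)
      · have hC : rem.any (fun pc => pc.1 == pv.1 && pvScanB (row :: rest) pc.2) = true := by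
          simp only [List.any_eq_true] at h1 ⊢
          obtain ⟨pc, hmem, hpc⟩ := h1
          refine ⟨pc, hmem, ?_⟩
          simp only [Bool.and_eq_true] at hpc ⊢
          exact ⟨hpc.1, by simp [pvScanB, List.any_cons, hpc.2]⟩
        simp only [Function.comp, h1, if_true, hC]
        simp
      · have h1f : (rem.any fun pc => pc.1 == pv.1 && pvCellHit row pc.2) = false :=
          Bool.eq_false_iff.mpr h1
        have h1fE : ∀ pc ∈ rem, ¬(pc.1 == pv.1 && pvCellHit row pc.2) = true :=
          List.any_eq_false.mp h1f
        have hcond : (rem.filter (fun pc => !pvCellHit row pc.2)).any (fun pc => pc.1 == pv.1 && pvScanB rest pc.2)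
            = rem.any (fun pc => pc.1 == pv.1 && pvScanB (row :: rest) pc.2) := by
          rw [List.any_filter, Bool.eq_iff_iff]
          simp only [List.any_eq_true]
          constructor
          · rintro ⟨pc, hmem, hpc⟩
            simp only [Bool.and_eq_true, Bool.not_eq_true'] at hpc
            obtain ⟨hhit, hkey, hscan⟩ := hpc
            refine ⟨pc, hmem, ?_⟩
            simp only [Bool.and_eq_true, pvScanB, List.any_cons] at hscan ⊢
            exact ⟨hkey, by simp [hscan]⟩
          · rintro ⟨pc, hmem, hpc⟩
            simp only [Bool.and_eq_true] at hpc
            obtain ⟨hkey, hscan⟩ := hpc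
            have hnh := h1fE pc hmem
            simp only [Bool.and_eq_true, hkey, true_and] at hnh
            have hhit : pvCellHit row pc.2 = false := by simpa using hnh
            refine ⟨pc, hmem, ?_⟩
            simp only [pvScanB, List.any_cons, hhit, Bool.false_or] at hscan
            simp [hhit, hkey, pvScanB, hscan]
        simp only [Function.comp, h1f, Bool.false_eq_true, if_false]
        rw [hcond]

-- B's whole pipeline characterized the same way A's was
lemma portB_items (rows : List (List String)) (aps : List (String × Int)) :
    get_program_availability_alt rows aps =
      (PySem.Dict.ofList aps).items.map
        (fun pc => (pc.1, if (PySem.Dict.ofList aps).items.any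
            (fun qc => qc.1 == pc.1 && pvScanB rows qc.2) then "available" else "not available")) := by
  show (pvSweep rows
      ((PySem.Dict.ofList aps).keys.foldl (fun d p => d.insert p "not available") PySem.Dict.empty)
      (PySem.Dict.ofList aps).items).items = _
  have havail : ((PySem.Dict.ofList aps).keys.foldl (fun d p => d.insert p "not available") PySem.Dict.empty).items
      = (PySem.Dict.ofList aps).keys.map (fun p => (p, "not available")) := by
    rw [PySem.Dict.items_foldl_insert_fresh ((PySem.Dict.ofList aps).keys) (fun p => p)
        (fun _ => "not available") PySem.Dict.empty
        (by intro a _; simp) (by simpa using PySem.Dict.nodup_keys_ofList (ps := aps))]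
    simp [PySem.Dict.empty]
  have hcont : ∀ pc ∈ (PySem.Dict.ofList aps).items,
      (((PySem.Dict.ofList aps).keys.foldl (fun d p => d.insert p "not available") PySem.Dict.empty).contains pc.1) = true := by
    intro pc hpc
    rw [PySem.Dict.contains_iff_mem_keys]
    show pc.1 ∈ (((PySem.Dict.ofList aps).keys.foldl (fun d p => d.insert p "not available") PySem.Dict.empty).items).map Prod.fst
    rw [havail, List.map_map]
    simpa using PySem.Dict.mem_keys_of_mem_items (p := pc) (d := PySem.Dict.ofList aps) hpc
  rw [pvSweep_items _ _ _ hcont, havail]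
  have hkeys : (PySem.Dict.ofList aps).keys = ((PySem.Dict.ofList aps).items).map Prod.fst := rfl
  rw [hkeys, List.map_map, List.map_map]
  apply List.map_congr_left
  intro pc _
  by_cases hx : (PySem.Dict.ofList aps).items.any (fun qc => qc.1 == pc.1 && pvScanB rows qc.2) <;>
    simp [Function.comp, hx]

-- ===== VERDICT (by name: the statement is the Claim_ definition above) =====
theorem get_program_availability_spec : Claim_equal_get_program_availability := by
  intro rows aps _ _
  unfold Spec_get_program_availability
  rw [portA_items, portB_items]
  apply List.map_congr_left
  intro pc hpc
  have hnd : ((PySem.Dict.ofList aps).items.map Prod.fst).Nodup := by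
    simpa [PySem.Dict.keys] using PySem.Dict.nodup_keys_ofList (ps := aps)
  have hany : (PySem.Dict.ofList aps).items.any (fun qc => qc.1 == pc.1 && pvScanB rows qc.2)
      = pvScanB rows pc.2 := by
    by_cases hS : pvScanB rows pc.2
    · rw [hS, List.any_eq_true]
      exact ⟨pc, hpc, by simp [hS]⟩
    · have hSf : pvScanB rows pc.2 = false := Bool.eq_false_iff.mpr hS
      rw [hSf, List.any_eq_false]
      intro qc hqc
      simp only [Bool.and_eq_true, not_and]
      intro hkey
      have : qc = pc := List.inj_on_of_nodup_map hnd hqc hpc (by simpa using hkey)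
      subst this
      simp [hSf]
  rw [hany]
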